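-- pv_equiv track=rewrite | github.com/CovertCloak06/divine-workspace | apps/dvn-toolkit/tools/forensics/hexview.py | format_ascii
-- ===== SOURCE A (Python) =====
-- RESET = '\033[0m'
--
-- DIM = '\033[2m'
--
-- def is_printable(byte):
--     """Check if byte is printable ASCII"""
--     return 32 <= byte <= 126
--
-- def format_ascii(data):
--     """Format bytes as ASCII with dots for non-printable"""
--     result = []
--     for byte in data:
--         if is_printable(byte):
--             result.append(chr(byte))
--         else:
--             result.append(f'{DIM}.{RESET}')
--     return ''.join(result)
-- ===== SOURCE B (Python) =====
-- RESET = '\033[0m'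
-- DIM = '\033[2m'
-- DOT = f'{DIM}.{RESET}'
--
-- def format_ascii(data):
--     """Format bytes as ASCII with dots for non-printable"""
--     data = list(data)
--     n = len(data)
--     out = []
--     i = 0
--     while i < n:
--         if 32 <= data[i] <= 126:
--             j = i
--             while j < n and 32 <= data[j] <= 126:
--                 j += 1
--             out.append(''.join(map(chr, data[i:j])))
--             i = j
--         else:
--             out.append(DOT)
--             i += 1
--     return ''.join(out)
-- ===== Notes on version B (the rewrite author's own statement) =====
-- stated objective: alternative
-- what changed: Replaces A's per-byte branch-and-append loop with a two-pointer run scanner: maximal runs of printable bytes are located and converted to text in one chunk each, and only non-printable bytes are emitted individually as the dotted placeholder.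
import Mathlib
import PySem

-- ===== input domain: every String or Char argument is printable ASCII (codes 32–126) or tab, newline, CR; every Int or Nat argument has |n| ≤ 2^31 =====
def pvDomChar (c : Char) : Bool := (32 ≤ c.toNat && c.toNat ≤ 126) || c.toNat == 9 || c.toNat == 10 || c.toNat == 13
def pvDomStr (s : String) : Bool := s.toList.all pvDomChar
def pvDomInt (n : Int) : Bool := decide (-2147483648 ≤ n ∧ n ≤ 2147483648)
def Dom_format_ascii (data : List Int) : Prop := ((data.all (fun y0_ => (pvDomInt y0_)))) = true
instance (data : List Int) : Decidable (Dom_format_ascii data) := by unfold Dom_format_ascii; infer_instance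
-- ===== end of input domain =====

-- B replaces A's per-byte branch-and-append loop with a two-pointer run scanner over maximal
-- printable runs (objective: alternative algorithm of the same cost).

-- ===== PORT A =====
def pvRESET : String := "\x1b[0m"
def pvDIM : String := "\x1b[2m"

def is_printable (byte : Int) : Bool := 32 ≤ byte && byte ≤ 126

def format_ascii (data : List Int) : String :=
  let result := data.foldl (fun result byte =>
    if is_printable byte then result ++ [String.ofList [Char.ofNat byte.toNat]]
    else result ++ [pvDIM ++ "." ++ pvRESET]) ([] : List String)
  PySem.Str.join "" result

-- ===== PORT B =====
def pvDOT : String := pvDIM ++ "." ++ pvRESET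

def pvPrn (b : Int) : Bool := 32 ≤ b && b ≤ 126

-- the outer while-loop of Source B: emit a whole printable run (inner while = takeWhile/dropWhile),
-- or a single pvDOT for a non-printable byte
def fa_runs : List Int → List String
  | [] => []
  | b :: rest =>
    if pvPrn b then
      String.ofList (((b :: rest).takeWhile pvPrn).map (fun x => Char.ofNat x.toNat))
        :: fa_runs (rest.dropWhile pvPrn)
    else
      pvDOT :: fa_runs rest
termination_by l => l.length
decreasing_by
  · exact Nat.lt_succ_of_le (rest.length_dropWhile_le pvPrn)
  · simp

def format_ascii_alt (data : List Int) : String :=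
  PySem.Str.join "" (fa_runs data)

-- ===== PRECONDITION & SPEC =====
def Spec_format_ascii (data : List Int) (out : String) : Prop := out = format_ascii_alt data
instance (data : List Int) (out : String) : Decidable (Spec_format_ascii data out) := by unfold Spec_format_ascii; infer_instance

-- ===== CLAIM (what is proved, stated in full; the proofs are below) =====
def Claim_equal_format_ascii : Prop := ∀ (data : List Int), Dom_format_ascii data → Spec_format_ascii data (format_ascii data)

-- ===== LEMMAS AND PROOFS =====

-- per-byte character chunk both programs produce for one byte
def pvChunk (b : Int) : List Char :=
  if pvPrn b then [Char.ofNat b.toNat] else pvDOT.toList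

theorem pv_join_empty_flatten (ps : List (List Char)) :
    PySem.Chars.join [] ps = ps.flatten := by
  induction ps with
  | nil => simp [PySem.Chars.join_nil]
  | cons p rest ih =>
    cases rest with
    | nil => simp [PySem.Chars.join_singleton]
    | cons q r => simp [PySem.Chars.join_cons_cons, ih]

-- A's fold builds exactly the per-byte chunk list
theorem pv_foldl_eq_map (data : List Int) :
    data.foldl (fun result byte =>
      if is_printable byte then result ++ [String.ofList [Char.ofNat byte.toNat]]
      else result ++ [pvDIM ++ "." ++ pvRESET]) ([] : List String)
    = data.map (fun b => String.ofList (pvChunk b)) := by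
  have h : ∀ (acc : List String),
      data.foldl (fun result byte =>
        if is_printable byte then result ++ [String.ofList [Char.ofNat byte.toNat]]
        else result ++ [pvDIM ++ "." ++ pvRESET]) acc
      = acc ++ data.map (fun b => String.ofList (pvChunk b)) := by
    induction data with
    | nil => intro acc; simp
    | cons x xs ih =>
      intro acc
      simp only [List.foldl_cons, List.map_cons]
      rw [ih]
      by_cases hp : pvPrn x
      · have hp' : is_printable x := hp
        simp [hp', pvChunk, hp]
      · have hp' : ¬ is_printable x := hp
        simp only [if_neg hp', pvChunk, if_neg hp]
        have : pvDIM ++ "." ++ pvRESET = String.ofList (pvDIM ++ "." ++ pvRESET).toList := by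
          rw [String.ofList_toList]
        rw [List.append_assoc]
        exact congrArg _ (by rw [this]; rfl)
  simpa using h []

-- a printable run flattens to its per-byte chunks
theorem pv_run_chunks (run : List Int) (h : ∀ x ∈ run, pvPrn x = true) :
    run.map (fun x => Char.ofNat x.toNat) = (run.map pvChunk).flatten := by
  induction run with
  | nil => simp
  | cons x xs ih =>
    simp only [List.map_cons, List.flatten_cons, pvChunk, if_pos (h x (by simp))]
    rw [ih (fun y hy => h y (by simp [hy]))]
    rfl

-- B's run list flattens (as characters) to the same per-byte chunks
theorem pv_runs_chunks (l : List Int) :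
    ((fa_runs l).map String.toList).flatten = (l.map pvChunk).flatten := by
  induction l using fa_runs.induct with
  | case1 => simp [fa_runs]
  | case2 b rest hp ih =>
    rw [fa_runs, if_pos hp]
    have hsplit : b :: rest = ((b :: rest).takeWhile pvPrn) ++ ((b :: rest).dropWhile pvPrn) :=
      (List.takeWhile_append_dropWhile).symm
    have hdrop : (b :: rest).dropWhile pvPrn = rest.dropWhile pvPrn := by
      simp [hp]
    conv_rhs => rw [hsplit]
    simp only [List.map_cons, List.flatten_cons, List.map_append, List.flatten_append, hdrop, ih]
    congr 1
    rw [String.toList_ofList]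
    exact pv_run_chunks _ (fun x hx => List.mem_takeWhile_imp hx)
  | case3 b rest hp ih =>
    rw [fa_runs, if_neg hp]
    simp only [List.map_cons, List.flatten_cons, pvChunk, if_neg hp, ih]

-- ===== VERDICT (by name: the statement is the Claim_ definition above) =====
theorem format_ascii_spec : Claim_equal_format_ascii := by
  intro data _
  unfold Spec_format_ascii format_ascii format_ascii_alt
  apply String.toList_inj.mp
  rw [pv_foldl_eq_map]
  rw [PySem.Str.toList_join, PySem.Str.toList_join]
  have : ("" : String).toList = [] := rfl
  rw [this, pv_join_empty_flatten, pv_join_empty_flatten, pv_runs_chunks, List.map_map]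
  congr 1
  apply List.map_congr_left
  intro b _
  simp [Function.comp, String.toList_ofList]
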